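-- pv_equiv track=rewrite | github.com/DanMHammer/aoc2019 | src/solutions/day3/main.py | traverse_path
-- ===== SOURCE A (Python) =====
-- def traverse_path(path):
--     x, y = 0, 0
--     # Exclude starting position
--     positions = []
--     for instruction in path:
--         if instruction[0] == "R":
--             x += int(instruction[1:])
--         elif instruction[0] == "L":
--             x -= int(instruction[1:])
--         if instruction[0] == "U":
--             y += int(instruction[1:])
--         if instruction[0] == "D":
--             y -= int(instruction[1:])
--         positions.append((x, y))
--     return positions
-- ===== SOURCE B (Python) =====
-- def _delta(instruction):
--     c = instruction[0]
--     if c in "RLUD":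
--         n = int(instruction[1:])
--         return (n if c == "R" else -n if c == "L" else 0,
--                 n if c == "U" else -n if c == "D" else 0)
--     return (0, 0)
--
--
-- def _prefix_sums(nums):
--     sums = []
--     total = 0
--     for n in nums:
--         total += n
--         sums.append(total)
--     return sums
--
--
-- def traverse_path(path):
--     deltas = [_delta(s) for s in path]
--     xs = _prefix_sums([d[0] for d in deltas])
--     ys = _prefix_sums([d[1] for d in deltas])
--     return list(zip(xs, ys))
-- ===== Notes on version B (the rewrite author's own statement) =====
-- stated objective: alternative
-- what changed: B replaces A's single stateful (x,y)-mutating loop by staged passes: decode every instruction to a (dx,dy) delta, take independent per-axis prefix sums of the dx and dy streams, and zip the two coordinate sequences back into points.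
import Mathlib
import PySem

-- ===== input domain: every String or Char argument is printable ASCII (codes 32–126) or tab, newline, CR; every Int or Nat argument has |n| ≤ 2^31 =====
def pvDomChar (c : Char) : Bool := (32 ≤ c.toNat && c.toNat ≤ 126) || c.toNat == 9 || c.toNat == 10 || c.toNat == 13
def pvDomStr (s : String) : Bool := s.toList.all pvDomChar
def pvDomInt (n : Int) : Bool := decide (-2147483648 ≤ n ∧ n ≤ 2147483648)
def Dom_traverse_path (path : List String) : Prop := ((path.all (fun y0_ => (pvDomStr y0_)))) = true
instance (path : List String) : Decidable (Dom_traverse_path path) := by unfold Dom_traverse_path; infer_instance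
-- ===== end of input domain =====

-- B replaces A's single stateful (x,y) loop by staged passes: decode instructions to
-- (dx,dy) deltas, take per-axis prefix sums, and zip the coordinate lists (alternative
-- decomposition, same cost).

-- ===== PORT A =====
-- one loop; state (x, y, positions); int(instruction[1:]) is total here via getD 0,
-- exact under Pre_ (which demands the parse succeeds exactly where A calls int)
def traverse_path (path : List String) : List (Int × Int) :=
  (path.foldl (fun (st : Int × Int × List (Int × Int)) instruction =>
      match instruction.toList with
      | [] => st  -- unreachable under Pre_ (instruction[0] would raise IndexError)
      | c :: rest =>
        let x := st.1
        let y := st.2.1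
        let x := if c = 'R' then x + (PySem.Int.ofChars? rest).getD 0
                 else if c = 'L' then x - (PySem.Int.ofChars? rest).getD 0
                 else x
        let y := if c = 'U' then y + (PySem.Int.ofChars? rest).getD 0 else y
        let y := if c = 'D' then y - (PySem.Int.ofChars? rest).getD 0 else y
        (x, y, st.2.2 ++ [(x, y)]))
    ((0 : Int), (0 : Int), ([] : List (Int × Int)))).2.2

-- ===== PORT B =====
-- _delta: instruction -> (dx, dy); int() total via getD 0, exact under Pre_
def pvDelta (instruction : String) : Int × Int :=
  match instruction.toList with
  | [] => (0, 0)  -- unreachable under Pre_ (instruction[0] would raise IndexError)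
  | c :: rest =>
    if c = 'R' ∨ c = 'L' ∨ c = 'U' ∨ c = 'D' then
      let n := (PySem.Int.ofChars? rest).getD 0
      (if c = 'R' then n else if c = 'L' then -n else 0,
       if c = 'U' then n else if c = 'D' then -n else 0)
    else (0, 0)

-- _prefix_sums: running totals of a list of ints
def pvPrefixSums (nums : List Int) : List Int :=
  (nums.foldl (fun (st : List Int × Int) n =>
      let total := st.2 + n
      (st.1 ++ [total], total))
    (([] : List Int), (0 : Int))).1

def traverse_path_alt (path : List String) : List (Int × Int) :=
  let deltas := path.map pvDelta
  let xs := pvPrefixSums (deltas.map (fun d => d.1))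
  let ys := pvPrefixSums (deltas.map (fun d => d.2))
  xs.zip ys

-- ===== PRECONDITION & SPEC =====
-- Pre_ excludes exactly the inputs where Python A raises: an empty instruction
-- (IndexError at instruction[0]) or an R/L/U/D instruction whose remainder is not a
-- valid int literal (ValueError at int(instruction[1:])).
def Pre_traverse_path (path : List String) : Prop :=
  ∀ s ∈ path, s.toList ≠ [] ∧
    ((s.toList.headD ' ' = 'R' ∨ s.toList.headD ' ' = 'L' ∨
      s.toList.headD ' ' = 'U' ∨ s.toList.headD ' ' = 'D') →
      (PySem.Int.ofChars? s.toList.tail).isSome = true)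
instance (path : List String) : Decidable (Pre_traverse_path path) := by
  unfold Pre_traverse_path; infer_instance

def pvWitness_traverse_path : List String := ["R8", "U5", "L5", "D3", "X2"]

def Spec_traverse_path (path : List String) (out : List (Int × Int)) : Prop := out = traverse_path_alt path
instance (path : List String) (out : List (Int × Int)) : Decidable (Spec_traverse_path path out) := by unfold Spec_traverse_path; infer_instance

-- ===== CLAIM (what is proved, stated in full; the proofs are below) =====
def Claim_equal_traverse_path : Prop := ∀ (path : List String), Dom_traverse_path path → Pre_traverse_path path → Spec_traverse_path path (traverse_path path)

-- ===== LEMMAS AND PROOFS =====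

-- reference walk: positions visited starting from (x, y)
def pvWalk (path : List String) (x y : Int) : List (Int × Int) :=
  match path with
  | [] => []
  | s :: rest =>
    let d := pvDelta s
    (x + d.1, y + d.2) :: pvWalk rest (x + d.1) (y + d.2)

-- prefix-sum fold from an arbitrary state
def pvScan (nums : List Int) (t : Int) : List Int :=
  match nums with
  | [] => []
  | n :: ns => (t + n) :: pvScan ns (t + n)

lemma pvPrefix_fold (nums : List Int) (t : Int) (acc : List Int) :
    (nums.foldl (fun (st : List Int × Int) n =>
      let total := st.2 + n
      (st.1 ++ [total], total)) (acc, t)).1 = acc ++ pvScan nums t := by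
  induction nums generalizing t acc with
  | nil => simp [pvScan]
  | cons n ns ih => simp [pvScan, ih, List.append_assoc]

-- B computed via pvWalk
lemma pv_alt_walk (path : List String) : traverse_path_alt path = pvWalk path 0 0 := by
  simp only [traverse_path_alt, pvPrefixSums, pvPrefix_fold, List.nil_append, List.map_map]
  have h : ∀ (l : List String) (x y : Int),
      (pvScan (l.map (fun s => (pvDelta s).1)) x).zip (pvScan (l.map (fun s => (pvDelta s).2)) y)
        = pvWalk l x y := by
    intro l
    induction l with
    | nil => intro x y; simp [pvScan, pvWalk]
    | cons s rest ih => intro x y; simp [pvScan, pvWalk, ih]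
  exact h path 0 0

-- A's fold computes acc ++ pvWalk from any state
lemma pv_fold_walk (path : List String)
    (h : ∀ s ∈ path, s.toList ≠ []) (x y : Int) (acc : List (Int × Int)) :
    (path.foldl (fun (st : Int × Int × List (Int × Int)) instruction =>
      match instruction.toList with
      | [] => st
      | c :: rest =>
        let x := st.1
        let y := st.2.1
        let x := if c = 'R' then x + (PySem.Int.ofChars? rest).getD 0
                 else if c = 'L' then x - (PySem.Int.ofChars? rest).getD 0
                 else x
        let y := if c = 'U' then y + (PySem.Int.ofChars? rest).getD 0 else y
        let y := if c = 'D' then y - (PySem.Int.ofChars? rest).getD 0 else y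
        (x, y, st.2.2 ++ [(x, y)])) (x, y, acc)).2.2
    = acc ++ pvWalk path x y := by
  induction path generalizing x y acc with
  | nil => simp [pvWalk]
  | cons s rest ih =>
    have hs : s.toList ≠ [] := h s (by simp)
    obtain ⟨c, cs, hcs⟩ : ∃ c cs, s.toList = c :: cs := by
      cases hh : s.toList with
      | nil => exact absurd hh hs
      | cons a b => exact ⟨a, b, rfl⟩
    have key : ∀ X Y : Int, X = x + (pvDelta s).1 → Y = y + (pvDelta s).2 →
        ((acc ++ [(X, Y)]) ++ pvWalk rest X Y : List (Int × Int))
          = acc ++ pvWalk (s :: rest) x y := by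
      intro X Y hX hY
      subst hX; subst hY
      rw [show pvWalk (s :: rest) x y
            = (x + (pvDelta s).1, y + (pvDelta s).2)
              :: pvWalk rest (x + (pvDelta s).1) (y + (pvDelta s).2) from rfl]
      simp
    simp only [List.foldl_cons, hcs]
    rw [ih (fun t ht => h t (by simp [ht]))]
    apply key
    · simp only [pvDelta, hcs]
      split_ifs <;> simp_all
      all_goals omega
    · simp only [pvDelta, hcs]
      split_ifs <;> simp_all
      all_goals omega

-- ===== VERDICT (by name: the statement is the Claim_ definition above) =====
theorem traverse_path_spec : Claim_equal_traverse_path := by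
  intro path _ hpre
  unfold Spec_traverse_path traverse_path
  rw [pv_alt_walk, pv_fold_walk path (fun s hs => (hpre s hs).1) 0 0 []]
  simp
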